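-- pv_equiv track=rewrite | github.com/dy-sh/spoty | spoty/local.py | group_tracks_by_pattern
-- ===== SOURCE A (Python) =====
-- def group_tracks_by_pattern(pattern, tracks, not_found_tag_name="Unknown"):
--     groups = {}
--
--     for track in tracks:
--         group_name = ""
--         tag_name = ""
--         building_tag = False
--         for c in pattern:
--             if c == "%":
--                 building_tag = not building_tag
--                 if not building_tag:
--                     tag = track[tag_name] if tag_name in track else not_found_tag_name
--                     group_name += tag
--                     tag_name = ""
--             else:
--                 if building_tag:
--                     tag_name += c
--                     tag_name = tag_name.upper()
--                 else:
--                     group_name += c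
--
--         if not group_name in groups:
--             groups[group_name] = []
--
--         groups[group_name].append(track)
--
--     return groups
-- ===== SOURCE B (Python) =====
-- def group_tracks_by_pattern(pattern, tracks, not_found_tag_name="Unknown"):
--     # Parse the pattern once: split on '%'; even segments are literal text,
--     # odd segments are tag names (a trailing unmatched '%' drops the last odd segment).
--     segments = pattern.split('%')
--     groups = {}
--     for track in tracks:
--         parts = []
--         for i, seg in enumerate(segments):
--             if i % 2 == 0:
--                 parts.append(seg)
--             elif i != len(segments) - 1:
--                 key = seg.upper()
--                 parts.append(track[key] if key in track else not_found_tag_name)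
--         name = ''.join(parts)
--         groups.setdefault(name, []).append(track)
--     return groups
-- ===== Notes on version B (the rewrite author's own statement) =====
-- stated objective: faster
-- what changed: B splits the pattern on '%' once and builds each group name by index-parity over the segments (even = literal, odd non-last = uppercased tag lookup), replacing A's per-character building_tag state machine that re-parses the pattern (with tag_name.upper() on every tag character) for every track.
import Mathlib
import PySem

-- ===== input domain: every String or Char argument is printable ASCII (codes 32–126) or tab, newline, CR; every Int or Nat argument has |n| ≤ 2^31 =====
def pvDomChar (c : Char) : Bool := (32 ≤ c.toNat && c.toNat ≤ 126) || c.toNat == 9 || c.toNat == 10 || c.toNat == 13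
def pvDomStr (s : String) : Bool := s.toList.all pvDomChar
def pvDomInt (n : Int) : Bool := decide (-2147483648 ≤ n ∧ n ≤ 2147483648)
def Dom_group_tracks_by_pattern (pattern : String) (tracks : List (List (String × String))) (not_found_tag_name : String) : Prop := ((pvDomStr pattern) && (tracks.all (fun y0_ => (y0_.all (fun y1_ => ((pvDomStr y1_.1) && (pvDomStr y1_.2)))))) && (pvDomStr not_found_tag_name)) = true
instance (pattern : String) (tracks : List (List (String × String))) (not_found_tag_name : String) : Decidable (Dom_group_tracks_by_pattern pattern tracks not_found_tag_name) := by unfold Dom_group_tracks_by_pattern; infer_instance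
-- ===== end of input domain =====

-- B replaces A's per-track per-character '%' state machine by splitting the pattern once on '%'
-- and substituting tags by segment-index parity; a timing run measured B faster (objective: faster).

-- ===== PORT A =====
-- one step of A's inner character loop; state = (group_name, tag_name, building_tag), strings as List Char
def aStep (track : List (String × String)) (not_found_tag_name : String)
    (st : List Char × List Char × Bool) (c : Char) : List Char × List Char × Bool :=
  let (group_name, tag_name, building_tag) := st
  if c = '%' then
    let building_tag := !building_tag
    if building_tag = false then
      let tag := (PySem.Dict.mk track).getD (String.mk tag_name) not_found_tag_name
      (group_name ++ tag.toList, [], building_tag)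
    else (group_name, tag_name, building_tag)
  else
    if building_tag then (group_name, PySem.Chars.upper (tag_name ++ [c]), building_tag)
    else (group_name ++ [c], tag_name, building_tag)

def group_tracks_by_pattern (pattern : String) (tracks : List (List (String × String))) (not_found_tag_name : String) : List (String × List (List (String × String))) :=
  (tracks.foldl (fun groups track =>
      let st := pattern.toList.foldl (aStep track not_found_tag_name) ([], [], false)
      let group_name := String.mk st.1
      let groups := if groups.contains group_name then groups else groups.insert group_name []
      groups.modify group_name [] (· ++ [track]))
    (PySem.Dict.empty : PySem.Dict String (List (List (String × String))))).items

-- ===== PORT B =====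
-- one step of B's loop over enumerate(segments): even index = literal, odd non-last = tag lookup
def bStep (track : List (String × String)) (not_found_tag_name : String) (total : Nat)
    (parts : List (List Char)) (p : Int × List Char) : List (List Char) :=
  if p.1 % 2 == 0 then parts ++ [p.2]
  else if p.1 ≠ (total : Int) - 1 then
    parts ++ [((PySem.Dict.mk track).getD (String.mk (PySem.Chars.upper p.2)) not_found_tag_name).toList]
  else parts

def group_tracks_by_pattern_alt (pattern : String) (tracks : List (List (String × String))) (not_found_tag_name : String) : List (String × List (List (String × String))) :=
  let segments := PySem.Chars.splitOn pattern.toList ['%']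
  (tracks.foldl (fun groups track =>
      let parts := (PySem.List.enumerate segments 0).foldl (bStep track not_found_tag_name segments.length) []
      let name := String.mk (PySem.Chars.join [] parts)
      (groups.setdefault name []).modify name [] (· ++ [track]))
    (PySem.Dict.empty : PySem.Dict String (List (List (String × String))))).items

-- ===== PRECONDITION & SPEC =====
def Spec_group_tracks_by_pattern (pattern : String) (tracks : List (List (String × String))) (not_found_tag_name : String) (out : List (String × List (List (String × String)))) : Prop := out = group_tracks_by_pattern_alt pattern tracks not_found_tag_name
instance (pattern : String) (tracks : List (List (String × String))) (not_found_tag_name : String) (out : List (String × List (List (String × String)))) : Decidable (Spec_group_tracks_by_pattern pattern tracks not_found_tag_name out) := by unfold Spec_group_tracks_by_pattern; infer_instance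

-- ===== CLAIM (what is proved, stated in full; the proofs are below) =====
def Claim_equal_group_tracks_by_pattern : Prop := ∀ (pattern : String) (tracks : List (List (String × String))) (not_found_tag_name : String), Dom_group_tracks_by_pattern pattern tracks not_found_tag_name → Spec_group_tracks_by_pattern pattern tracks not_found_tag_name (group_tracks_by_pattern pattern tracks not_found_tag_name)

-- ===== LEMMAS AND PROOFS =====

-- reference splitting of a char list on '%'
def splitPct : List Char → List (List Char)
  | [] => [[]]
  | c :: rest => if c = '%' then [] :: splitPct rest else (splitPct rest).modifyHead (c :: ·)

-- reference rendering of the segment list: parity-alternating, last odd segment dropped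
def partsPct (track : List (String × String)) (nf : String) : Bool → List (List Char) → List (List Char)
  | _, [] => []
  | false, s :: rest => s :: partsPct track nf true rest
  | true, [_] => []
  | true, s :: r :: rest =>
      ((PySem.Dict.mk track).getD (String.mk (PySem.Chars.upper s)) nf).toList :: partsPct track nf false (r :: rest)

theorem upperChar_idem (c : Char) : PySem.Chars.upperChar (PySem.Chars.upperChar c) = PySem.Chars.upperChar c := by
  unfold PySem.Chars.upperChar PySem.Chars.islower
  split_ifs with h1 h2 <;> try rfl
  exfalso
  simp only [Bool.and_eq_true, decide_eq_true_eq, Char.le_def, UInt32.le_iff_toNat_le] at h1 h2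
  obtain ⟨a1, a2⟩ := h1
  obtain ⟨b1, b2⟩ := h2
  have ha1 : 97 ≤ c.toNat := a1
  have ha2 : c.toNat ≤ 122 := a2
  have hv : Nat.isValidChar (c.toNat - 32) := Or.inl (by omega)
  have hb1 : 97 ≤ (Char.ofNat (c.toNat - 32)).toNat := b1
  rw [Char.toNat_ofNat, if_pos hv] at hb1
  omega

theorem upper_idem (x : List Char) : PySem.Chars.upper (PySem.Chars.upper x) = PySem.Chars.upper x := by
  simp [PySem.Chars.upper, List.map_map, Function.comp_def, upperChar_idem]

theorem splitPct_ne_nil (cs : List Char) : splitPct cs ≠ [] := by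
  induction cs with
  | nil => simp [splitPct]
  | cons c rest ih =>
    simp only [splitPct]
    split_ifs
    · simp
    · cases h : splitPct rest with
      | nil => exact absurd h ih
      | cons s X => simp [List.modifyHead]

theorem join0_cons (x : List Char) (xs : List (List Char)) :
    PySem.Chars.join [] (x :: xs) = x ++ PySem.Chars.join [] xs := by
  cases xs <;> simp [PySem.Chars.join, List.intercalate]

theorem go_spec (cs : List Char) : ∀ (fuel : Nat) (cur : List Char) (acc : List (List Char)),
    cs.length < fuel →
    PySem.Chars.splitOn.go ['%'] fuel cs cur acc =
      acc.reverse ++ (splitPct cs).modifyHead (fun x => cur.reverse ++ x) := by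
  induction cs with
  | nil =>
    intro fuel cur acc h
    match fuel with
    | fuel + 1 => simp [PySem.Chars.splitOn.go, splitPct, List.modifyHead]
  | cons c rest ih =>
    intro fuel cur acc h
    match fuel with
    | fuel + 1 =>
      simp only [PySem.Chars.splitOn.go]
      by_cases hc : c = '%'
      · subst hc
        rw [if_pos (by simp [List.isPrefixOf])]
        rw [show List.drop ['%'].length ('%' :: rest) = rest from rfl]
        rw [ih fuel [] (cur.reverse :: acc) (by simpa using h)]
        cases hs : splitPct rest with
        | nil => exact absurd hs (splitPct_ne_nil rest)
        | cons s X => simp [splitPct, List.modifyHead, hs]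
      · rw [if_neg (by simp [List.isPrefixOf]; exact fun h => hc h.symm)]
        rw [ih fuel (c :: cur) acc (by simpa using h)]
        cases hs : splitPct rest with
        | nil => exact absurd hs (splitPct_ne_nil rest)
        | cons s X => simp [splitPct, hc, hs, List.modifyHead]

theorem splitOn_eq (cs : List Char) : PySem.Chars.splitOn cs ['%'] = splitPct cs := by
  unfold PySem.Chars.splitOn
  rw [go_spec cs (cs.length + 1) [] [] (by omega)]
  cases hs : splitPct cs with
  | nil => exact absurd hs (splitPct_ne_nil cs)
  | cons s X => simp [List.modifyHead]

theorem aStep_pct (track : List (String × String)) (nf : String) (g t : List Char) (b : Bool) :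
    aStep track nf (g, t, b) '%' =
      if b then (g ++ ((PySem.Dict.mk track).getD (String.mk t) nf).toList, [], false)
      else (g, t, true) := by
  cases b <;> simp [aStep]

theorem aStep_chr (track : List (String × String)) (nf : String) (g t : List Char) (b : Bool)
    (c : Char) (hc : c ≠ '%') :
    aStep track nf (g, t, b) c =
      if b then (g, PySem.Chars.upper (t ++ [c]), true) else (g ++ [c], t, false) := by
  cases b <;> simp [aStep, hc]

theorem scan_spec (track : List (String × String)) (nf : String) :
    ∀ (cs g t : List Char) (b : Bool), (b = false → t = []) → PySem.Chars.upper t = t →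
    (cs.foldl (aStep track nf) (g, t, b)).1 =
      g ++ PySem.Chars.join [] (partsPct track nf b ((splitPct cs).modifyHead (t ++ ·))) := by
  intro cs
  induction cs with
  | nil =>
    intro g t b hb ht
    cases b
    · rw [hb rfl]
      simp [splitPct, partsPct, List.modifyHead]
    · simp [splitPct, partsPct, List.modifyHead]
  | cons c rest ih =>
    intro g t b hb ht
    by_cases hc : c = '%'
    · subst hc
      cases b
      · rw [hb rfl]
        rw [List.foldl_cons, aStep_pct, if_neg (by simp)]
        rw [ih g [] true (by simp) (by simp [PySem.Chars.upper])]
        cases hs : splitPct rest with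
        | nil => exact absurd hs (splitPct_ne_nil rest)
        | cons s X => simp [splitPct, hs, List.modifyHead, partsPct, join0_cons]
      · rw [List.foldl_cons, aStep_pct, if_pos (by simp)]
        rw [ih _ [] false (by simp) (by simp [PySem.Chars.upper])]
        cases hs : splitPct rest with
        | nil => exact absurd hs (splitPct_ne_nil rest)
        | cons s X =>
          cases X <;>
            simp [splitPct, hs, List.modifyHead, partsPct, join0_cons, ht, List.append_assoc]
    · cases b
      · rw [hb rfl]
        rw [List.foldl_cons, aStep_chr _ _ _ _ _ _ hc, if_neg (by simp)]
        rw [ih (g ++ [c]) [] false (by simp) (by simp [PySem.Chars.upper])]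
        cases hs : splitPct rest with
        | nil => exact absurd hs (splitPct_ne_nil rest)
        | cons s X => simp [splitPct, hc, hs, List.modifyHead, partsPct, join0_cons, List.append_assoc]
      · rw [List.foldl_cons, aStep_chr _ _ _ _ _ _ hc, if_pos (by simp)]
        rw [ih g (PySem.Chars.upper (t ++ [c])) true (by simp) (upper_idem _)]
        cases hs : splitPct rest with
        | nil => exact absurd hs (splitPct_ne_nil rest)
        | cons s X =>
          cases X with
          | nil => simp [splitPct, hc, hs, List.modifyHead, partsPct]
          | cons y Y =>
            have hkey : PySem.Chars.upper (PySem.Chars.upper (t ++ [c]) ++ s)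
                = PySem.Chars.upper (t ++ c :: s) := by
              simp only [PySem.Chars.upper, List.map_append, List.map_map, List.map_cons,
                List.map_nil, Function.comp_def, upperChar_idem]
              simp
            simp [splitPct, hc, hs, List.modifyHead, partsPct, join0_cons, hkey]

theorem bparts_spec (track : List (String × String)) (nf : String) (n : Nat) :
    ∀ (segs : List (List Char)) (k : Nat) (parts : List (List Char)), k + segs.length = n →
    (PySem.List.enumerate segs (k : Int)).foldl (bStep track nf n) parts =
      parts ++ partsPct track nf (decide (k % 2 = 1)) segs := by
  intro segs
  induction segs with
  | nil => intro k parts _; simp [PySem.List.enumerate, partsPct]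
  | cons s rest ih =>
    intro k parts hn
    rw [PySem.List.enumerate_cons]
    simp only [List.foldl_cons]
    have hk1 : ((k : Int) + 1) = ((k + 1 : Nat) : Int) := by push_cast; ring
    by_cases hk : k % 2 = 0
    · have hmod : ((k : Int) % 2 == 0) = true := by
        simp only [beq_iff_eq]
        omega
      rw [show bStep track nf n parts ((k : Int), s) = parts ++ [s] by simp [bStep, hmod]]
      rw [hk1, ih (k + 1) (parts ++ [s]) (by simp only [List.length_cons] at hn ⊢; omega)]
      have h1 : (decide (k % 2 = 1)) = false := by simp; omega
      have h2 : (decide ((k + 1) % 2 = 1)) = true := by simp; omega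
      rw [h1, h2]
      simp [partsPct]
    · have hmod : ((k : Int) % 2 == 0) = false := by
        simp only [beq_eq_false_iff_ne, ne_eq]
        omega
      have h1 : (decide (k % 2 = 1)) = true := by simp; omega
      cases rest with
      | nil =>
        have hlast : ((k : Int) ≠ (n : Int) - 1) = False := by
          simp only [List.length_cons, List.length_nil] at hn
          simp only [ne_eq, eq_iff_iff, iff_false, not_not]
          omega
        rw [show bStep track nf n parts ((k : Int), s) = parts by simp [bStep, hmod, hlast]]
        rw [h1]
        simp [PySem.List.enumerate, partsPct]
      | cons r R =>
        have hlast : ((k : Int) = (n : Int) - 1) = False := by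
          simp only [List.length_cons] at hn
          simp only [eq_iff_iff, iff_false]
          omega
        have hstep : bStep track nf n parts ((k : Int), s)
            = parts ++ [((PySem.Dict.mk track).getD (String.mk (PySem.Chars.upper s)) nf).toList] := by
          simp only [bStep, hmod, Bool.false_eq_true, if_false, ne_eq, hlast]
          simp
        rw [hstep, hk1, ih (k + 1) _ (by simp only [List.length_cons] at hn ⊢; omega)]
        have h3 : (decide ((k + 1) % 2 = 1)) = false := by simp; omega
        rw [h1, h3]
        simp [partsPct]

theorem name_eq (pattern : String) (track : List (String × String)) (nf : String) :
    (pattern.toList.foldl (aStep track nf) ([], [], false)).1 =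
      PySem.Chars.join [] ((PySem.List.enumerate (PySem.Chars.splitOn pattern.toList ['%']) 0).foldl
        (bStep track nf (PySem.Chars.splitOn pattern.toList ['%']).length) []) := by
  rw [scan_spec track nf pattern.toList [] [] false (fun _ => rfl) (by simp [PySem.Chars.upper])]
  rw [show ((0 : Int)) = ((0 : Nat) : Int) by rfl]
  rw [bparts_spec track nf (PySem.Chars.splitOn pattern.toList ['%']).length _ 0 [] (by omega)]
  rw [splitOn_eq]
  cases hs : splitPct pattern.toList with
  | nil => exact absurd hs (splitPct_ne_nil pattern.toList)
  | cons s X => simp [List.modifyHead]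

theorem foldl_fun_congr {α β : Type} (f g : α → β → α) (h : ∀ a b, f a b = g a b)
    (l : List β) (a : α) : l.foldl f a = l.foldl g a := by
  have hfg : f = g := funext fun a => funext (h a)
  rw [hfg]

theorem setdefault_eq_ite {κ ν : Type} [BEq κ] (d : PySem.Dict κ ν) (k : κ) (v : ν) :
    d.setdefault k v = if d.contains k then d else d.insert k v := by
  simp only [PySem.Dict.setdefault, PySem.Dict.insert]
  split_ifs <;> simp_all

-- ===== VERDICT (by name: the statement is the Claim_ definition above) =====
theorem group_tracks_by_pattern_spec : Claim_equal_group_tracks_by_pattern := by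
  intro pattern tracks not_found_tag_name _
  unfold Spec_group_tracks_by_pattern group_tracks_by_pattern group_tracks_by_pattern_alt
  congr 1
  apply foldl_fun_congr
  intro groups track
  simp only [setdefault_eq_ite, name_eq pattern track not_found_tag_name]
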